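-- pv_equiv track=rewrite | github.com/b4keSn4ke/pynCoder | pyncoder.py | isBase32
-- ===== SOURCE A (Python) =====
-- def isBase32(line):
--     for char in line:
--         if char == " ":
--             return False
--         if ord(char) <= 47:
--             return False
--         if ord(char) > 96:
--             return False
--         if ord(char) < 65 and ord(char) != 61:
--             if ord(char)>= 48 and ord(char) <=57:
--                 continue
--             else:
--                 return False
--         if ord(char) >=91 and ord(char) < 97:
--             return False
--     return True
-- ===== SOURCE B (Python) =====
-- import re
--
-- _B32_RE = re.compile(r'[0-9A-Z=]*\Z')
--
-- def isBase32(line):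
--     return bool(_B32_RE.match(line))
-- ===== Notes on version B (the rewrite author's own statement) =====
-- stated objective: idiomatic
-- what changed: Replaced the per-character ord-comparison branch cascade with a single anchored regular-expression match over the class [0-9A-Z=].
import Mathlib
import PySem

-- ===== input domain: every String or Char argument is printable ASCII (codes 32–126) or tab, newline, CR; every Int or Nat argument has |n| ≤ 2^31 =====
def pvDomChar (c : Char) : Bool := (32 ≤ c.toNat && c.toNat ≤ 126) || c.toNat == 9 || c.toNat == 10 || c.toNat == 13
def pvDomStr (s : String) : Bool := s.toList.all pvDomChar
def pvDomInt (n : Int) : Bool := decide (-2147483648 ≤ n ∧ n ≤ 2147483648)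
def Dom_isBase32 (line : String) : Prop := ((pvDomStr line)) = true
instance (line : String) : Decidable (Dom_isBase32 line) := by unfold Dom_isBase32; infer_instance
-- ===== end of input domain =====

-- B replaces A's per-character ord-comparison cascade with an anchored regex-class check ([0-9A-Z=]*), ported as an "all chars in class" test (objective: idiomatic).


-- ===== PORT A =====
-- loop with early returns, transcribed as structural recursion over the characters
def isBase32Loop : List Char → Bool
  | [] => true
  | c :: rest =>
    if c = ' ' then false
    else if c.toNat ≤ 47 then false
    else if c.toNat > 96 then false
    else if c.toNat < 65 ∧ c.toNat ≠ 61 then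
      if c.toNat ≥ 48 ∧ c.toNat ≤ 57 then isBase32Loop rest else false
    else if c.toNat ≥ 91 ∧ c.toNat < 97 then false
    else isBase32Loop rest

def isBase32 (line : String) : Bool := isBase32Loop line.toList

-- ===== PORT B =====
-- Source B: bool(re.match(r'[0-9A-Z=]*\Z', line)) — the anchored regex over the class
-- [0-9A-Z=] accepts exactly the strings all of whose characters lie in the class.
def b32Class (c : Char) : Bool :=
  ((48 ≤ c.toNat && c.toNat ≤ 57) || (65 ≤ c.toNat && c.toNat ≤ 90) || c.toNat == 61)

def isBase32_alt (line : String) : Bool := line.toList.all b32Class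

-- ===== PRECONDITION & SPEC =====
def Spec_isBase32 (line : String) (out : Bool) : Prop := out = isBase32_alt line
instance (line : String) (out : Bool) : Decidable (Spec_isBase32 line out) := by unfold Spec_isBase32; infer_instance

-- ===== CLAIM (what is proved, stated in full; the proofs are below) =====
def Claim_equal_isBase32 : Prop := ∀ (line : String), Dom_isBase32 line → Spec_isBase32 line (isBase32 line)

-- ===== LEMMAS AND PROOFS =====

-- ===== VERDICT (by name: the statement is the Claim_ definition above) =====
lemma loop_eq_all (cs : List Char) : isBase32Loop cs = cs.all b32Class := by
  induction cs with
  | nil => rfl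
  | cons c rest ih =>
    simp only [isBase32Loop, List.all_cons, b32Class, ih]
    by_cases h0 : c = ' '
    · simp [h0]
    · simp only [if_neg h0]
      split_ifs with h1 h2 h3 h4 h5 <;> simp <;> omega

theorem isBase32_spec : Claim_equal_isBase32 := by
  intro line _
  unfold Spec_isBase32 isBase32 isBase32_alt
  exact loop_eq_all line.toList
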